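-- pv_equiv track=rewrite | github.com/EraserKing/Collect233 | Collect233.py | combineTimePeriod
-- ===== SOURCE A (Python) =====
-- def combineTimePeriod(countBySecond, totalTimeInSecond, arrayLength):
--     countByPeriod = {}
--     timePiece = totalTimeInSecond // arrayLength
--
--     for i in range(arrayLength):
--         countByPeriod[i * timePiece] = 0
--         for second in countBySecond.keys():
--             if (i * timePiece) <= second < ((i + 1) * timePiece):
--                 countByPeriod[i * timePiece] = countByPeriod[i * timePiece] + countBySecond[second]
--
--     return (countByPeriod)
-- ===== SOURCE B (Python) =====
-- def combineTimePeriod(countBySecond, totalTimeInSecond, arrayLength):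
--     timePiece = totalTimeInSecond // arrayLength
--     counts = [0] * arrayLength
--     if timePiece > 0:
--         for second, count in countBySecond.items():
--             idx = second // timePiece
--             if 0 <= idx < arrayLength:
--                 counts[idx] += count
--     return {i * timePiece: counts[i] for i in range(arrayLength)}
-- ===== Notes on version B (the rewrite author's own statement) =====
-- stated objective: faster
-- what changed: Replaces A's nested scan (rescan every key of countBySecond for each of the arrayLength periods) by an index-addressed counts array filled in one pass (bucket index = second // timePiece), then emitted as the period dict.
import Mathlib
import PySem

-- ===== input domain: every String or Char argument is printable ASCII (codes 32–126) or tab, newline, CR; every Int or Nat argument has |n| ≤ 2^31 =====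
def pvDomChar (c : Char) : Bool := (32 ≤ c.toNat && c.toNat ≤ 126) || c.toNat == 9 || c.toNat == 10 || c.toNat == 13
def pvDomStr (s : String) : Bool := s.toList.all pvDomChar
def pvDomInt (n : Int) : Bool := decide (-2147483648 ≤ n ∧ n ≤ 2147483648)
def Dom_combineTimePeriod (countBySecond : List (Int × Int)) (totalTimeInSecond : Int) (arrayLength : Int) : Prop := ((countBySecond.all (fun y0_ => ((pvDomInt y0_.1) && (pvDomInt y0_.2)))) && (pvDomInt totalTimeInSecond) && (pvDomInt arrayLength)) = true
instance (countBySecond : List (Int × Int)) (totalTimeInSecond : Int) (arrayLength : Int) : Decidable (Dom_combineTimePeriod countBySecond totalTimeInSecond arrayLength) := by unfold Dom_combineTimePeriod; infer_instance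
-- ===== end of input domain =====

-- B replaces A's nested rescan of countBySecond per period by an index-addressed counts array
-- filled in one pass (bucket index = second // timePiece); measured asymptotically faster.

-- ===== PORT A =====
-- A's nested loops: for each i in range(arrayLength), set bucket i*timePiece to 0,
-- then rescan every key of countBySecond and add the matching counts.
-- countBySecond[second] with second drawn from its keys cannot raise, so getD is exact here.
def combineTimePeriod (countBySecond : List (Int × Int)) (totalTimeInSecond : Int) (arrayLength : Int) : List (Int × Int) :=
  let cbs : PySem.Dict Int Int := PySem.Dict.ofList countBySecond
  let timePiece := PySem.Int.floordiv totalTimeInSecond arrayLength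
  let countByPeriod :=
    (PySem.List.pyRange 0 arrayLength 1).foldl
      (fun cp i =>
        let cp := cp.insert (i * timePiece) 0
        cbs.keys.foldl
          (fun cp second =>
            if i * timePiece ≤ second ∧ second < (i + 1) * timePiece then
              cp.insert (i * timePiece) (cp.getD (i * timePiece) 0 + cbs.getD second 0)
            else cp)
          cp)
      PySem.Dict.empty
  countByPeriod.items

-- ===== PORT B =====
-- Source B: counts = [0]*arrayLength; fill counts[second // timePiece] in one pass over the items
-- (the 0 ≤ idx < arrayLength guard makes counts[idx] in range, so List.set/getD are exact);
-- then emit {i*timePiece: counts[i]} as a dict comprehension.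
def combineTimePeriod_alt (countBySecond : List (Int × Int)) (totalTimeInSecond : Int) (arrayLength : Int) : List (Int × Int) :=
  let cbs : PySem.Dict Int Int := PySem.Dict.ofList countBySecond
  let timePiece := PySem.Int.floordiv totalTimeInSecond arrayLength
  let counts : List Int := List.replicate arrayLength.toNat 0
  let counts :=
    if 0 < timePiece then
      cbs.items.foldl
        (fun cs p =>
          let idx := PySem.Int.floordiv p.1 timePiece
          if 0 ≤ idx ∧ idx < arrayLength then
            cs.set idx.toNat (cs.getD idx.toNat 0 + p.2)
          else cs)
        counts
    else counts
  ((PySem.List.pyRange 0 arrayLength 1).foldl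
    (fun d i => d.insert (i * timePiece) (counts.getD i.toNat 0)) PySem.Dict.empty).items

-- ===== PRECONDITION & SPEC =====
-- Pre_ excludes only arrayLength = 0, where A raises ZeroDivisionError on '//'.
def Pre_combineTimePeriod (countBySecond : List (Int × Int)) (totalTimeInSecond : Int) (arrayLength : Int) : Prop := arrayLength ≠ 0
instance (countBySecond : List (Int × Int)) (totalTimeInSecond : Int) (arrayLength : Int) : Decidable (Pre_combineTimePeriod countBySecond totalTimeInSecond arrayLength) := by unfold Pre_combineTimePeriod; infer_instance
def pvWitness_combineTimePeriod : (List (Int × Int)) × Int × Int := ([(0, 2), (5, 3)], 10, 2)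

def Spec_combineTimePeriod (countBySecond : List (Int × Int)) (totalTimeInSecond : Int) (arrayLength : Int) (out : List (Int × Int)) : Prop := out = combineTimePeriod_alt countBySecond totalTimeInSecond arrayLength
instance (countBySecond : List (Int × Int)) (totalTimeInSecond : Int) (arrayLength : Int) (out : List (Int × Int)) : Decidable (Spec_combineTimePeriod countBySecond totalTimeInSecond arrayLength out) := by unfold Spec_combineTimePeriod; infer_instance

-- ===== CLAIM (what is proved, stated in full; the proofs are below) =====
def Claim_equal_combineTimePeriod : Prop := ∀ (countBySecond : List (Int × Int)) (totalTimeInSecond : Int) (arrayLength : Int), Dom_combineTimePeriod countBySecond totalTimeInSecond arrayLength → Pre_combineTimePeriod countBySecond totalTimeInSecond arrayLength → Spec_combineTimePeriod countBySecond totalTimeInSecond arrayLength (combineTimePeriod countBySecond totalTimeInSecond arrayLength)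

-- ===== LEMMAS AND PROOFS =====

-- A's inner loop: accumulation at the touched key
theorem pvInner_getD (ks : List Int) (cp : PySem.Dict Int Int) (k : Int)
    (P : Int → Prop) [DecidablePred P] (g : Int → Int) :
    (ks.foldl (fun cp s => if P s then cp.insert k (cp.getD k 0 + g s) else cp) cp).getD k 0
      = cp.getD k 0 + ((ks.filter (fun s => decide (P s))).map g).sum := by
  induction ks generalizing cp with
  | nil => simp
  | cons s ks ih =>
    by_cases h : P s
    · simp [h, ih, PySem.Dict.getD_insert_self]; ring
    · simp [h, ih]

-- A's inner loop: other keys untouched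
theorem pvInner_getD_ne (ks : List Int) (cp : PySem.Dict Int Int) (k k' : Int)
    (P : Int → Prop) [DecidablePred P] (g : Int → Int) (hne : k' ≠ k) :
    (ks.foldl (fun cp s => if P s then cp.insert k (cp.getD k 0 + g s) else cp) cp).getD k' 0
      = cp.getD k' 0 := by
  induction ks generalizing cp with
  | nil => rfl
  | cons s ks ih =>
    by_cases h : P s
    · simp [h, ih, PySem.Dict.getD_insert_of_ne _ _ _ hne]
    · simp [h, ih]

-- A's inner loop: keys unchanged when the touched key is already present
theorem pvInner_keys (ks : List Int) (cp : PySem.Dict Int Int) (k : Int)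
    (P : Int → Prop) [DecidablePred P] (g : Int → Int) (hc : cp.contains k = true) :
    (ks.foldl (fun cp s => if P s then cp.insert k (cp.getD k 0 + g s) else cp) cp).keys
      = cp.keys := by
  induction ks generalizing cp with
  | nil => rfl
  | cons s ks ih =>
    by_cases h : P s
    · simp only [List.foldl_cons, if_pos h]
      rw [ih _ (by simp [PySem.Dict.contains_insert_self]),
        PySem.Dict.keys_insert_of_contains _ _ hc]
    · simp only [List.foldl_cons, if_neg h]
      exact ih _ hc

-- a conditional fold whose condition never holds is the identity
theorem pvFold_id {α β : Type} (ks : List β) (cp : α)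
    (P : β → Prop) [DecidablePred P] (f : α → β → α) (h : ∀ s ∈ ks, ¬ P s) :
    (ks.foldl (fun cp s => if P s then f cp s else cp) cp) = cp := by
  induction ks generalizing cp with
  | nil => rfl
  | cons s ks ih =>
    simp only [List.foldl_cons, if_neg (h s (by simp))]
    exact ih cp (fun s hs => h s (by simp [hs]))

-- proof-side names for A's outer fold and its bucket sums
def pvAOuter (cbs : PySem.Dict Int Int) (tp : Int) (cp : PySem.Dict Int Int) (i : Int) : PySem.Dict Int Int :=
  cbs.keys.foldl
    (fun cp second =>
      if i * tp ≤ second ∧ second < (i + 1) * tp then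
        cp.insert (i * tp) (cp.getD (i * tp) 0 + cbs.getD second 0)
      else cp)
    (cp.insert (i * tp) 0)

def pvASum (cbs : PySem.Dict Int Int) (tp i : Int) : Int :=
  ((cbs.keys.filter (fun s => decide (i * tp ≤ s ∧ s < (i + 1) * tp))).map (fun s => cbs.getD s 0)).sum

theorem pvAPort_eq (countBySecond : List (Int × Int)) (T L : Int) :
    combineTimePeriod countBySecond T L
      = ((PySem.List.pyRange 0 L 1).foldl
          (pvAOuter (PySem.Dict.ofList countBySecond) (PySem.Int.floordiv T L)) PySem.Dict.empty).items := rfl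

-- A's outer loop: the keys it creates, in order
theorem pvAOuter_keys (cbs : PySem.Dict Int Int) (tp : Int) (is : List Int) (cp : PySem.Dict Int Int)
    (hdisj : ∀ i ∈ is, i * tp ∉ cp.keys) (hnd : (is.map (· * tp)).Nodup) :
    (is.foldl (pvAOuter cbs tp) cp).keys = cp.keys ++ is.map (· * tp) := by
  induction is generalizing cp with
  | nil => simp
  | cons i rest ih =>
    simp only [List.map_cons, List.nodup_cons] at hnd
    have hcf : cp.contains (i * tp) = false := by
      rcases h : cp.contains (i * tp) with _ | _
      · rfl
      · exact absurd ((PySem.Dict.contains_iff_mem_keys cp _).mp h) (hdisj i (by simp))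
    have hk1 : (pvAOuter cbs tp cp i).keys = cp.keys ++ [i * tp] := by
      rw [pvAOuter, pvInner_keys _ _ _ _ _ (PySem.Dict.contains_insert_self _ _ _),
        PySem.Dict.keys_insert_of_not_contains _ _ hcf]
    rw [List.foldl_cons, ih _ ?_ hnd.2, hk1]
    · simp
    · intro j hj
      rw [hk1]
      simp only [List.mem_append, List.mem_singleton]
      rintro (h | h)
      · exact hdisj j (by simp [hj]) h
      · exact hnd.1 (h ▸ List.mem_map_of_mem hj)

-- A's outer loop leaves keys outside is untouched
theorem pvAOuter_getD_notmem (cbs : PySem.Dict Int Int) (tp : Int) (is : List Int)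
    (cp : PySem.Dict Int Int) (k' : Int) (hk : k' ∉ is.map (· * tp)) :
    (is.foldl (pvAOuter cbs tp) cp).getD k' 0 = cp.getD k' 0 := by
  induction is generalizing cp with
  | nil => rfl
  | cons i rest ih =>
    simp only [List.map_cons, List.mem_cons, not_or] at hk
    rw [List.foldl_cons, ih _ (by simp [hk.2]), pvAOuter,
      pvInner_getD_ne _ _ _ _ _ _ hk.1, PySem.Dict.getD_insert_of_ne _ _ _ hk.1]

-- A's outer loop: final value of bucket i*tp
theorem pvAOuter_getD_mem (cbs : PySem.Dict Int Int) (tp : Int) (is : List Int)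
    (cp : PySem.Dict Int Int) (i : Int) (hnd : (is.map (· * tp)).Nodup) (hi : i ∈ is) :
    (is.foldl (pvAOuter cbs tp) cp).getD (i * tp) 0 = pvASum cbs tp i := by
  induction is generalizing cp with
  | nil => cases hi
  | cons j rest ih =>
    simp only [List.map_cons, List.nodup_cons] at hnd
    rw [List.foldl_cons]
    rcases List.mem_cons.mp hi with rfl | hi
    · rw [pvAOuter_getD_notmem _ _ _ _ _ hnd.1, pvAOuter, pvInner_getD,
        PySem.Dict.getD_insert_self, zero_add]
      rfl
    · exact ih _ hnd.2 hi

-- B's counts-pass step, named for the proofs (definitionally the port's lambda)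
def pvBStepC (tp L : Int) (cs : List Int) (p : Int × Int) : List Int :=
  if 0 ≤ PySem.Int.floordiv p.1 tp ∧ PySem.Int.floordiv p.1 tp < L then
    cs.set (PySem.Int.floordiv p.1 tp).toNat (cs.getD (PySem.Int.floordiv p.1 tp).toNat 0 + p.2)
  else cs

theorem pvBStepC_length (tp L : Int) (cs : List Int) (p : Int × Int) :
    (pvBStepC tp L cs p).length = cs.length := by
  unfold pvBStepC; split <;> simp

-- B's counts pass: the accumulated value at slot i.toNat (length-invariant carried through)
theorem pvCounts_getD (tp L : Int) (ps : List (Int × Int)) (cs : List Int) (i : Int)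
    (hlen : cs.length = L.toNat) (hi0 : 0 ≤ i) (hiL : i < L) :
    (ps.foldl (pvBStepC tp L) cs).getD i.toNat 0
      = cs.getD i.toNat 0
        + ((ps.filter (fun p => decide (PySem.Int.floordiv p.1 tp = i))).map (·.2)).sum := by
  induction ps generalizing cs with
  | nil => simp
  | cons p ps ih =>
    have hiln : i.toNat < cs.length := by omega
    rw [List.foldl_cons, List.filter_cons,
      ih _ (by rw [pvBStepC_length, hlen])]
    by_cases hidx : PySem.Int.floordiv p.1 tp = i
    · have hset : pvBStepC tp L cs p = cs.set i.toNat (cs.getD i.toNat 0 + p.2) := by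
        unfold pvBStepC; rw [hidx]; exact if_pos ⟨hi0, hiL⟩
      have hgd : (cs.set i.toNat (cs.getD i.toNat 0 + p.2)).getD i.toNat 0
          = cs.getD i.toNat 0 + p.2 := by
        simp [List.getD_eq_getElem?_getD, List.getElem?_set_self, hiln]
      simp only [hidx, decide_true, if_pos, List.map_cons, List.sum_cons, hset, hgd]
      ring
    · have hgd : (pvBStepC tp L cs p).getD i.toNat 0 = cs.getD i.toNat 0 := by
        unfold pvBStepC
        split
        · have hne : (PySem.Int.floordiv p.1 tp).toNat ≠ i.toNat := by omega
          simp [List.getD_eq_getElem?_getD, List.getElem?_set_ne hne]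
        · rfl
      simp only [hidx, decide_false, if_neg, Bool.false_eq_true, not_false_eq_true, hgd]

-- on a period index i with 0 < tp, membership in A's window equals B's bucket equation
theorem pvCond_iff (tp i s : Int) (htp : 0 < tp) :
    (i * tp ≤ s ∧ s < (i + 1) * tp) ↔ PySem.Int.floordiv s tp = i :=
  (PySem.Int.floordiv_eq_iff_of_pos htp).symm

-- A's sum over keys (with lookups) equals B's sum over items, for each period index
theorem pvSum_eq (cbs : PySem.Dict Int Int) (tp i : Int) (hnd : cbs.keys.Nodup)
    (htp : 0 < tp) :
    pvASum cbs tp i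
      = ((cbs.items.filter (fun p => decide (PySem.Int.floordiv p.1 tp = i))).map (·.2)).sum := by
  have hkeys : cbs.keys = cbs.items.map (·.1) := rfl
  rw [pvASum, hkeys, List.filter_map, List.map_map]
  congr 1
  rw [List.filter_congr (q := fun p => decide (PySem.Int.floordiv p.1 tp = i))
    (fun p _ => by
      simp only [Function.comp]
      exact decide_eq_decide.mpr (pvCond_iff tp i p.1 htp))]
  refine List.map_congr_left (fun p hp => ?_)
  have hpmem : (p.1, p.2) ∈ cbs.items := by
    have := List.mem_of_mem_filter hp
    simpa using this
  exact PySem.Dict.getD_of_mem_items cbs hpmem hnd 0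

-- ===== VERDICT (by name: the statement is the Claim_ definition above) =====
theorem combineTimePeriod_spec : Claim_equal_combineTimePeriod := by
  intro countBySecond T L _ hpre
  unfold Spec_combineTimePeriod
  rw [pvAPort_eq]
  show _ = combineTimePeriod_alt countBySecond T L
  unfold combineTimePeriod_alt
  set cbs := PySem.Dict.ofList countBySecond with hcbs
  set tp := PySem.Int.floordiv T L with htpdef
  set K := PySem.List.pyRange 0 L 1 with hK
  by_cases htp : 0 < tp
  · -- positive piece
    simp only [if_pos htp]
    have hstep : (fun (cs : List Int) (p : Int × Int) =>
        let idx := PySem.Int.floordiv p.1 tp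
        if 0 ≤ idx ∧ idx < L then cs.set idx.toNat (cs.getD idx.toNat 0 + p.2) else cs)
        = pvBStepC tp L := rfl
    rw [hstep]
    set counts := cbs.items.foldl (pvBStepC tp L)
      (List.replicate L.toNat (0 : Int)) with hcounts
    have hKnd : (K.map (· * tp)).Nodup :=
      (PySem.List.nodup_pyRange_one 0 L).map (mul_left_injective₀ (ne_of_gt htp))
    have hcbsnd : cbs.keys.Nodup := PySem.Dict.nodup_keys_ofList countBySecond
    have haKeys : ((K.foldl (pvAOuter cbs tp) PySem.Dict.empty)).keys = K.map (· * tp) := by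
      rw [pvAOuter_keys cbs tp K PySem.Dict.empty (by simp [PySem.Dict.keys_empty]) hKnd]
      simp [PySem.Dict.keys_empty]
    have hbItems :
        ((K.foldl (fun d i => d.insert (i * tp) (counts.getD i.toNat 0)) PySem.Dict.empty)).items
          = K.map (fun i => (i * tp, counts.getD i.toNat 0)) := by
      have := PySem.Dict.items_foldl_insert_fresh K (fun i => i * tp)
        (fun i => counts.getD i.toNat 0) PySem.Dict.empty
        (fun a _ => PySem.Dict.contains_empty _) hKnd
      simpa using this
    rw [hbItems]
    apply Eq.trans (PySem.Dict.items_eq_map_keys _ (haKeys ▸ hKnd) 0)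
    rw [haKeys, List.map_map]
    refine List.map_congr_left (fun i hi => ?_)
    have hi' := (PySem.List.mem_pyRange_one).mp hi
    simp only [Function.comp]
    congr 1
    rw [pvAOuter_getD_mem cbs tp K PySem.Dict.empty i hKnd hi,
      pvSum_eq cbs tp i hcbsnd htp, hcounts,
      pvCounts_getD tp L cbs.items (List.replicate L.toNat 0) i (by simp) hi'.1 hi'.2]
    simp [List.getD_eq_getElem?_getD, List.getElem?_replicate]
    split <;> simp
  · -- tp ≤ 0: every window is empty on both sides; both folds insert (i*tp, 0)
    simp only [if_neg htp]
    have hA : pvAOuter cbs tp = fun cp i => cp.insert (i * tp) 0 := by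
      funext cp i
      rw [pvAOuter]
      exact pvFold_id _ _ _ _ (by rintro s hs ⟨h1, h2⟩; nlinarith)
    have hrep : ∀ i : Int, (List.replicate L.toNat (0 : Int)).getD i.toNat 0 = 0 := by
      intro i
      simp [List.getD_eq_getElem?_getD, List.getElem?_replicate]
      split <;> simp
    have hB : (fun (d : PySem.Dict Int Int) (i : Int) =>
        d.insert (i * tp) ((List.replicate L.toNat (0 : Int)).getD i.toNat 0))
        = fun d i => d.insert (i * tp) 0 := by
      funext d i; rw [hrep]
    rw [hA, hB]
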